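-- pv_equiv track=rewrite | github.com/HARRY5D/C_O_D_E | PYTHON/timepass.py | even_prime_intersection
-- ===== SOURCE A (Python) =====
-- def even_prime_intersection(limit):
--     def is_prime(n):
--         if n < 2:
--             return False
--         for i in range(2, int(n ** 0.5) + 1):
--             if n % i == 0:
--                 return False
--         return True
--
--     even_numbers = set(range(0, limit + 1, 2))
--     prime_numbers = {n for n in range(2, limit + 1) if is_prime(n)}
--     return even_numbers.intersection(prime_numbers)
-- ===== SOURCE B (Python) =====
-- def even_prime_intersection(limit):
--     # The only even prime is 2, so the intersection is {2} iff 2 <= limit.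
--     return {2} if limit >= 2 else set()
-- ===== Notes on version B (the rewrite author's own statement) =====
-- stated objective: faster
-- what changed: Replaces the sieve-style enumeration (build all evens, test primality of every n up to limit, intersect) with the O(1) closed form: the only even prime is 2, so the result is {2} when limit >= 2 and the empty set otherwise.
import Mathlib
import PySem

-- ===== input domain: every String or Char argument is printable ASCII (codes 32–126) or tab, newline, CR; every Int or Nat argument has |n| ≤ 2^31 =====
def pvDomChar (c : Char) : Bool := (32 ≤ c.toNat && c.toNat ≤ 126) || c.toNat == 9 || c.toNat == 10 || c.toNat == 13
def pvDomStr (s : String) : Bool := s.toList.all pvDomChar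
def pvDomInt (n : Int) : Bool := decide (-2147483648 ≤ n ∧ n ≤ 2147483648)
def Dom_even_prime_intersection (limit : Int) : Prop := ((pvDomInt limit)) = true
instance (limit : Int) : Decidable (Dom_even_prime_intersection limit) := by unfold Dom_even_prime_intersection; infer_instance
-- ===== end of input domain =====

-- B replaces A's enumerate-and-intersect with the O(1) closed form {2 if limit >= 2}.


-- ===== PORT A =====
-- inner helper is_prime; int(n ** 0.5) = Nat.sqrt, exact for the nonneg n ≤ 2^31 it is called on
def pvIsPrime (n : Int) : Bool :=
  if n < 2 then false
  else (PySem.List.pyRange 2 ((Nat.sqrt n.toNat : Int) + 1) 1).all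
    (fun i => !(PySem.Int.mod n i == 0))

def even_prime_intersection (limit : Int) : List Int :=
  let even_numbers : PySem.Set Int := PySem.Set.ofList (PySem.List.pyRange 0 (limit + 1) 2)
  let prime_numbers : PySem.Set Int :=
    PySem.Set.ofList ((PySem.List.pyRange 2 (limit + 1) 1).filter (fun n => pvIsPrime n))
  PySem.Set.inter even_numbers prime_numbers

-- ===== PORT B =====
def even_prime_intersection_alt (limit : Int) : List Int :=
  if 2 ≤ limit then [2] else []

-- ===== PRECONDITION & SPEC =====
def Spec_even_prime_intersection (limit : Int) (out : List Int) : Prop := out = even_prime_intersection_alt limit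
instance (limit : Int) (out : List Int) : Decidable (Spec_even_prime_intersection limit out) := by unfold Spec_even_prime_intersection; infer_instance

-- ===== CLAIM (what is proved, stated in full; the proofs are below) =====
def Claim_equal_even_prime_intersection : Prop := ∀ (limit : Int), Dom_even_prime_intersection limit → Spec_even_prime_intersection limit (even_prime_intersection limit)

-- ===== LEMMAS AND PROOFS =====

-- membership in A's prime set, as a plain condition
lemma pvMemPrimes (limit x : Int) :
    (PySem.Set.ofList ((PySem.List.pyRange 2 (limit + 1) 1).filter (fun n => pvIsPrime n))).contains x = true
      ↔ (2 ≤ x ∧ x < limit + 1 ∧ pvIsPrime x = true) := by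
  rw [PySem.Set.contains_iff, PySem.Set.mem_ofList, List.mem_filter,
    PySem.List.mem_pyRange_one]
  tauto

-- an even number ≥ 4 fails A's trial division (2 divides it)
lemma pvIsPrime_even_false (x : Int) (hx : 4 ≤ x) (hdvd : (2 : Int) ∣ x) :
    pvIsPrime x = false := by
  unfold pvIsPrime
  rw [if_neg (by omega)]
  apply eq_false_of_ne_true
  intro hall
  rw [List.all_eq_true] at hall
  have h2 : (2 : Int) ∈ PySem.List.pyRange 2 ((Nat.sqrt x.toNat : Int) + 1) 1 := by
    rw [PySem.List.mem_pyRange_one]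
    have : 2 ≤ Nat.sqrt x.toNat := by
      rw [Nat.le_sqrt]; omega
    omega
  have := hall 2 h2
  rw [(PySem.Int.mod_eq_zero_iff_dvd x 2).mpr hdvd] at this
  simp at this

lemma pvFilterRangeOne (q : Nat → Bool) (hq : ∀ k, q k = true ↔ k = 1) (N : Nat) :
    (List.range N).filter q = if 1 < N then [1] else [] := by
  induction N with
  | zero => simp
  | succ n ih =>
    rw [List.range_succ, List.filter_append, ih]
    by_cases h1 : n = 1
    · subst h1
      simp [hq]
    · have : q n = false := by
        apply eq_false_of_ne_true; intro h; exact h1 ((hq n).mp h)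
      by_cases h2 : 1 < n <;> simp [this, h2] <;> omega

-- ===== VERDICT (by name: the statement is the Claim_ definition above) =====
theorem even_prime_intersection_spec : Claim_equal_even_prime_intersection := by
  intro limit _
  show _ = _
  unfold even_prime_intersection even_prime_intersection_alt
  simp only []
  set primes : PySem.Set Int :=
    PySem.Set.ofList ((PySem.List.pyRange 2 (limit + 1) 1).filter (fun n => pvIsPrime n))
    with hprimes
  have hnodup : (PySem.List.pyRange 0 (limit + 1) 2).Nodup := by
    rw [PySem.List.pyRange_of_pos 0 (limit + 1) (by norm_num)]
    exact List.nodup_range.map (fun a b h => by omega)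
  rw [PySem.Set.ofList_eq_self_of_nodup _ hnodup]
  show (PySem.List.pyRange 0 (limit + 1) 2).filter (fun x => primes.contains x)
      = if 2 ≤ limit then [2] else []
  by_cases hlim : 2 ≤ limit
  · rw [if_pos hlim, PySem.List.pyRange_of_pos 0 (limit + 1) (by norm_num),
      List.filter_map]
    have hqc : ∀ k : Nat,
        ((fun x => primes.contains x) ∘ (fun k : Nat => 0 + 2 * (k : Int))) k = true ↔ k = 1 := by
      intro k
      simp only [Function.comp, hprimes, pvMemPrimes]
      constructor
      · rintro ⟨hk2, _, hp⟩
        by_contra hne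
        have hk : k = 0 ∨ 2 ≤ k := by omega
        rcases hk with h | h
        · omega
        · rw [pvIsPrime_even_false _ (by omega) ⟨(k : Int), by ring⟩] at hp
          exact Bool.false_ne_true hp
      · rintro rfl
        have h2 : (0 + 2 * ((1 : Nat) : Int)) = 2 := by norm_num
        rw [h2]
        exact ⟨by norm_num, by omega,
          by simp [pvIsPrime, PySem.List.pyRange_one_eq_nil]⟩
    rw [pvFilterRangeOne _ hqc]
    have hN : 1 < (if (0 : Int) < limit + 1 then ((limit + 1 - 0 + 2 - 1) / 2).toNat else 0) := by
      rw [if_pos (by omega)]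
      omega
    rw [if_pos hN]
    norm_num
  · rw [if_neg hlim]
    rw [List.filter_eq_nil_iff]
    intro x hx
    rw [PySem.List.mem_pyRange_iff_of_pos (by norm_num)] at hx
    simp only [hprimes, Bool.not_eq_true]
    apply eq_false_of_ne_true
    intro h
    rw [pvMemPrimes] at h
    omega
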